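-- pv_equiv track=rewrite | github.com/as-ideas/DeepPhonemizer | dp/phonemizer.py | _expand_acronym
-- ===== SOURCE A (Python) =====
-- from itertools import zip_longest
--
-- def _expand_acronym(word: str) -> str:
--     subwords = []
--     for subword in word.split('-'):
--         expanded = []
--         for a, b in zip_longest(subword, subword[1:]):
--             expanded.append(a)
--             if b is not None and b.isupper():
--                 expanded.append('-')
--         expanded = ''.join(expanded)
--         subwords.append(expanded)
--     return '-'.join(subwords)
-- ===== SOURCE B (Python) =====
-- def _expand_acronym(word: str) -> str:
--     out = []
--     prev = None
--     for c in word: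
--         if prev is not None and prev != '-' and c.isupper():
--             out.append('-')
--         out.append(c)
--         prev = c
--     return ''.join(out)
-- ===== Notes on version B (the rewrite author's own statement) =====
-- stated objective: simpler
-- what changed: Replaced the split-on-'-' plus per-subword zip_longest lookahead with a single flat pass over the characters that tracks the previous character and inserts '-' before an uppercase letter whose predecessor exists and is not already '-'.
import Mathlib
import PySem

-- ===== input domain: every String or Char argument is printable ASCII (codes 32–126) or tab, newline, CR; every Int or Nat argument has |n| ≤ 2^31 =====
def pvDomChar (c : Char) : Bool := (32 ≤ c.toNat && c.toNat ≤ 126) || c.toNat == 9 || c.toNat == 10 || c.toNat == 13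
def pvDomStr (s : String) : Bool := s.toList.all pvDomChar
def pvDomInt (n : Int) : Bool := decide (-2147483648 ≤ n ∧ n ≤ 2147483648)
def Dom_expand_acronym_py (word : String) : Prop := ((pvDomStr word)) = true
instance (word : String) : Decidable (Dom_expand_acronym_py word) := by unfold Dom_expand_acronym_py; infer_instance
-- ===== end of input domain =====

-- B replaces A's split-on-'-' + per-subword zip_longest lookahead with one flat scan
-- tracking the previous character (objective: simpler).

-- ===== PORT A =====
-- inner loop: for a, b in zip_longest(subword, subword[1:]): append a; if b is not None and b.isupper(): append '-'
def pvZipPass : List Char → List Char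
  | [] => []
  | [a] => [a]
  | a :: b :: rest => a :: ((if PySem.Chars.isupper b then ['-'] else []) ++ pvZipPass (b :: rest))

def expand_acronym_py (word : String) : String :=
  String.ofList (PySem.Chars.join ['-']
    ((PySem.Chars.splitOn word.toList ['-']).map pvZipPass))

-- ===== PORT B =====
-- flat pass: prev is the previous character (None before the first)
def pvScan : Option Char → List Char → List Char
  | _, [] => []
  | prev, c :: rest =>
      (if (match prev with
           | none => false
           | some p => decide (p ≠ '-') && PySem.Chars.isupper c)
       then ['-'] else []) ++ (c :: pvScan (some c) rest)

def expand_acronym_py_alt (word : String) : String :=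
  String.ofList (pvScan none word.toList)

-- ===== PRECONDITION & SPEC =====
def Spec_expand_acronym_py (word : String) (out : String) : Prop := out = expand_acronym_py_alt word
instance (word : String) (out : String) : Decidable (Spec_expand_acronym_py word out) := by unfold Spec_expand_acronym_py; infer_instance

-- ===== CLAIM (what is proved, stated in full; the proofs are below) =====
def Claim_equal_expand_acronym_py : Prop := ∀ (word : String), Dom_expand_acronym_py word → Spec_expand_acronym_py word (expand_acronym_py word)

-- ===== LEMMAS AND PROOFS =====

-- a clean recursive version of split-on-'-'
def pvSplit : List Char → List (List Char)
  | [] => [[]]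
  | c :: rest => if c = '-' then [] :: pvSplit rest else (pvSplit rest).modifyHead (c :: ·)

theorem pvSplit_ne_nil (cs : List Char) : pvSplit cs ≠ [] := by
  cases cs with
  | nil => simp [pvSplit]
  | cons c rest =>
    simp only [pvSplit]
    split_ifs
    · simp
    · cases h : pvSplit rest with
      | nil => exact absurd h (pvSplit_ne_nil rest)
      | cons a l => simp [List.modifyHead]

theorem pvGoEq : ∀ (fuel : Nat) (cs cur : List Char) (acc : List (List Char)),
    cs.length ≤ fuel →
    PySem.Chars.splitOn.go ['-'] fuel cs cur acc
      = acc.reverse ++ (pvSplit cs).modifyHead (cur.reverse ++ ·) := by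
  intro fuel
  induction fuel with
  | zero =>
    intro cs cur acc h
    have : cs = [] := List.length_eq_zero_iff.mp (Nat.le_zero.mp h)
    subst this
    simp [PySem.Chars.splitOn.go, pvSplit, List.modifyHead]
  | succ n ih =>
    intro cs cur acc h
    cases cs with
    | nil => simp [PySem.Chars.splitOn.go, pvSplit, List.modifyHead]
    | cons c rest =>
      have hr : rest.length ≤ n := by simpa using h
      by_cases hc : c = '-'
      · subst hc
        have hpre : List.isPrefixOf ['-'] ('-' :: rest) = true := by
          simp [List.isPrefixOf]
        rw [PySem.Chars.splitOn.go]
        simp only [hpre, if_true]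
        rw [ih _ _ _ (by simpa using hr)]
        obtain ⟨a, l, hal⟩ : ∃ a l, pvSplit rest = a :: l := by
          cases h' : pvSplit rest with
          | nil => exact absurd h' (pvSplit_ne_nil rest)
          | cons a l => exact ⟨a, l, rfl⟩
        simp [pvSplit, hal, List.modifyHead]
      · have hpre : List.isPrefixOf ['-'] (c :: rest) = false := by
          simp [List.isPrefixOf]
          intro h'; exact absurd h'.symm hc
        rw [PySem.Chars.splitOn.go]
        simp only [hpre]
        rw [if_neg (by simp), ih _ _ _ hr]
        obtain ⟨a, l, hal⟩ : ∃ a l, pvSplit rest = a :: l := by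
          cases h' : pvSplit rest with
          | nil => exact absurd h' (pvSplit_ne_nil rest)
          | cons a l => exact ⟨a, l, rfl⟩
        simp [pvSplit, hc, hal, List.modifyHead]

theorem pvSplitOn_eq (cs : List Char) : PySem.Chars.splitOn cs ['-'] = pvSplit cs := by
  rw [PySem.Chars.splitOn, pvGoEq (cs.length + 1) cs [] [] (by omega)]
  obtain ⟨a, l, hal⟩ : ∃ a l, pvSplit cs = a :: l := by
    cases h' : pvSplit cs with
    | nil => exact absurd h' (pvSplit_ne_nil cs)
    | cons a l => exact ⟨a, l, rfl⟩
  simp [hal, List.modifyHead]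

-- after a hyphen the scan behaves like at the start
theorem pvScan_dash (l : List Char) : pvScan (some '-') l = pvScan none l := by
  cases l with
  | nil => rfl
  | cons c rest => simp [pvScan]

-- the zip_longest pass on a hyphen-free b :: l is the scan with prev = b
theorem pvZipPass_eq_scan : ∀ (l : List Char), (∀ c ∈ l, c ≠ '-') → ∀ b, b ≠ '-' →
    pvZipPass (b :: l) = b :: pvScan (some b) l := by
  intro l
  induction l with
  | nil => intro _ b _; rfl
  | cons c rest ih =>
    intro hl b hb
    have hc : c ≠ '-' := hl c (by simp)
    have hrest : ∀ x ∈ rest, x ≠ '-' := fun x hx => hl x (by simp [hx])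
    simp only [pvZipPass, pvScan, ih hrest c hc]
    simp [hb]

theorem pvScan_none_eq_zipPass (l : List Char) (hl : ∀ c ∈ l, c ≠ '-') :
    pvScan none l = pvZipPass l := by
  cases l with
  | nil => rfl
  | cons b rest =>
    have hb : b ≠ '-' := hl b (by simp)
    have hrest : ∀ x ∈ rest, x ≠ '-' := fun x hx => hl x (by simp [hx])
    rw [pvZipPass_eq_scan rest hrest b hb]
    simp [pvScan]

-- the scan distributes over a hyphen
theorem pvScan_append_dash : ∀ (t : List Char) (prev : Option Char) (t2 : List Char),
    pvScan prev (t ++ '-' :: t2) = pvScan prev t ++ '-' :: pvScan none t2 := by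
  intro t
  induction t with
  | nil =>
    intro prev t2
    have hnd : PySem.Chars.isupper '-' = false := by decide
    cases prev with
    | none => simp [pvScan, pvScan_dash]
    | some p => simp [pvScan, pvScan_dash, hnd]
  | cons c rest ih =>
    intro prev t2
    simp only [List.cons_append, pvScan, ih (some c) t2]
    split_ifs <;> simp

def pvND (x : Char) : Bool := x ≠ '-'

theorem pvND_false {x : Char} (h : pvND x = false) : x = '-' := by
  simpa [pvND] using h

theorem pvSplit_structure (cs : List Char) :
    pvSplit cs = cs.takeWhile pvND ::
      (match cs.dropWhile pvND with
       | [] => []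
       | _ :: t => pvSplit t) := by
  induction cs with
  | nil => simp [pvSplit, List.takeWhile, List.dropWhile]
  | cons c rest ih =>
    by_cases hc : c = '-'
    · subst hc
      have : pvND '-' = false := by decide
      simp [pvSplit, List.takeWhile, List.dropWhile, this]
    · have hnd : pvND c = true := by simp [pvND, hc]
      simp only [pvSplit, if_neg hc, ih, List.takeWhile, List.dropWhile, hnd]
      simp [List.modifyHead]

theorem pvDropWhile_head : ∀ (cs : List Char) (c : Char) (t2 : List Char),
    cs.dropWhile pvND = c :: t2 → c = '-' := by
  intro cs
  induction cs with
  | nil => intro c t2 h; simp [List.dropWhile] at h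
  | cons x r ih =>
    intro c t2 h
    by_cases hx : pvND x
    · rw [List.dropWhile_cons_of_pos hx] at h
      exact ih c t2 h
    · rw [List.dropWhile_cons_of_neg hx] at h
      have : x = '-' := pvND_false (by simpa using hx)
      cases h
      exact this

-- main lemma: A's composite pipeline equals B's flat scan
theorem pvMain : ∀ (n : Nat) (cs : List Char), cs.length ≤ n →
    PySem.Chars.join ['-'] ((pvSplit cs).map pvZipPass) = pvScan none cs := by
  intro n
  induction n with
  | zero =>
    intro cs h
    have : cs = [] := List.length_eq_zero_iff.mp (Nat.le_zero.mp h)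
    subst this
    simp [pvSplit, pvZipPass, pvScan, PySem.Chars.join_singleton]
  | succ n ih =>
    intro cs h
    have htw : ∀ c ∈ cs.takeWhile pvND, c ≠ '-' := by
      intro c hc
      have := List.mem_takeWhile_imp hc
      simpa [pvND] using this
    rw [pvSplit_structure cs]
    cases hd : cs.dropWhile pvND with
    | nil =>
      have hcs : cs = cs.takeWhile pvND := by
        conv_lhs => rw [← List.takeWhile_append_dropWhile (p := pvND) (l := cs)]
        rw [hd, List.append_nil]
      simp only [List.map, PySem.Chars.join_singleton]
      rw [← pvScan_none_eq_zipPass _ htw, ← hcs]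
    | cons c t2 =>
      have hc : c = '-' := pvDropWhile_head cs c t2 hd
      subst hc
      have hcs : cs = cs.takeWhile pvND ++ '-' :: t2 := by
        conv_lhs => rw [← List.takeWhile_append_dropWhile (p := pvND) (l := cs)]
        rw [hd]
      have ht2 : t2.length ≤ n := by
        have : cs.length = (cs.takeWhile pvND).length + (t2.length + 1) := by
          conv_lhs => rw [hcs]
          simp
        omega
      obtain ⟨a, l, hal⟩ : ∃ a l, pvSplit t2 = a :: l := by
        cases h' : pvSplit t2 with
        | nil => exact absurd h' (pvSplit_ne_nil t2)
        | cons a l => exact ⟨a, l, rfl⟩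
      simp only [List.map, hal, List.map_cons, PySem.Chars.join_cons_cons]
      rw [← List.map_cons, ← hal, ih t2 ht2]
      conv_rhs => rw [hcs]
      rw [pvScan_append_dash, ← pvScan_none_eq_zipPass _ htw]
      simp

-- ===== VERDICT (by name: the statement is the Claim_ definition above) =====
theorem expand_acronym_py_spec : Claim_equal_expand_acronym_py := by
  intro word _
  unfold Spec_expand_acronym_py expand_acronym_py expand_acronym_py_alt
  rw [pvSplitOn_eq, pvMain word.toList.length word.toList (le_refl _)]
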